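-- pv_equiv track=rewrite | github.com/yofn/pyacm | bnu/team_201003/m.py | f
-- ===== SOURCE A (Python) =====
-- i2c = lambda i: chr(i+ord('a'))
--
-- def f(r,c,ll):
--     # inflate and add boundary
--     m  = {'/':['.','/'],'\\':['\\','.'],'.':['.','.']}
--     ll = [['.'] + [m[ll[i>>1][j>>1]][(i+j)%2] for j in range(c<<1)] + ['.'] for i in range(r<<1)]
--     rr = (r+1)<<1
--     cc = (c+1)<<1
--     ll = [['.']*cc] + ll + [['.']*cc]
--     # count CC by dfs!
--     vd = lambda p: p[0]>=0 and p[0]<rr and p[1]>=0 and p[1]<cc and ll[p[0]][p[1]]=='.'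
--     dr = [(0,1),(0,-1),(-1,0),(1,0)]
--     k  = 0
--     s  = [None]*(rr*cc)
--     for i in range(rr):
--         for j in range(cc):
--             if ll[i][j]!='.':
--                 continue
--             sp       = 0    #stack pointer, points to current stack head!
--             s[sp]    = (i,j)
--             ll[i][j] = i2c(k)   #mark for CC idx
--             while sp>-1:
--                 p   = s[sp]
--                 sp -= 1
--                 for d in dr:
--                     pp = (p[0]+d[0],p[1]+d[1])
--                     if vd(pp):
--                         sp   += 1
--                         s[sp] = (pp[0],pp[1])
--                         ll[pp[0]][pp[1]] = i2c(k) #mark for CC idx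
--             k += 1
--     return k-1
-- ===== SOURCE B (Python) =====
-- def f(r, c, ll):
--     # inflate and add boundary (same grid construction as the original)
--     m = {'/': ['.', '/'], '\\': ['\\', '.'], '.': ['.', '.']}
--     g = [['.'] + [m[ll[i >> 1][j >> 1]][(i + j) % 2] for j in range(c << 1)] + ['.'] for i in range(r << 1)]
--     rr = (r + 1) << 1
--     cc = (c + 1) << 1
--     g = [['.'] * cc] + g + [['.'] * cc]
--     # collect the dot cells once, then peel off connected components by
--     # frontier-set BFS over the coordinate set (no grid mutation, no stack)
--     dots = {(i, j) for i in range(rr) for j in range(cc) if g[i][j] == '.'}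
--     count = 0
--     for i in range(rr):
--         for j in range(cc):
--             if (i, j) not in dots:
--                 continue
--             comp = {(i, j)}
--             frontier = {(i, j)}
--             while frontier:
--                 frontier = {(p0 + d0, p1 + d1)
--                             for (p0, p1) in frontier
--                             for (d0, d1) in ((0, 1), (0, -1), (-1, 0), (1, 0))
--                             if (p0 + d0, p1 + d1) in dots and (p0 + d0, p1 + d1) not in comp}
--                 comp |= frontier
--             dots -= comp
--             count += 1
--     return count - 1
-- ===== Notes on version B (the rewrite author's own statement) =====
-- stated objective: alternative
-- what changed: Replaces the explicit-stack DFS that relabels grid cells in place with a frontier-set BFS that peels whole connected components off a set of dot coordinates built once (no grid mutation, no stack array, no per-component character labels).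
import Mathlib
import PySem

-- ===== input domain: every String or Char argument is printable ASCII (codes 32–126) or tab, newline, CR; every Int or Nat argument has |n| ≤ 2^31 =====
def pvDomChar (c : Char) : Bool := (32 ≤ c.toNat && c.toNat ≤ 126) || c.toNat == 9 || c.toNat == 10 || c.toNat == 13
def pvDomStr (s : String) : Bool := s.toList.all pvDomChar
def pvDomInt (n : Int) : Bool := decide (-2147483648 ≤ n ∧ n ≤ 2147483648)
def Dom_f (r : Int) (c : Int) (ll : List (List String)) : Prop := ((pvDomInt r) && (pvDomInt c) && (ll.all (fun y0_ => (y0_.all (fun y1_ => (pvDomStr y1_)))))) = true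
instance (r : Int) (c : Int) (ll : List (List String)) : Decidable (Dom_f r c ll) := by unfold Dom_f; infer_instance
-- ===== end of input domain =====

-- B keeps A's grid inflation but replaces the explicit-stack DFS with frontier-set BFS
-- peeling components off a coordinate set (alternative algorithm, not claimed faster).

-- ===== PORT A =====
-- i2c = lambda i: chr(i+ord('a'))
def i2cP (k : Nat) : String := String.ofList [Char.ofNat (k + 97)]

-- m[x]: the three dict entries as an if-chain; any other key is a Python KeyError,
-- excluded by Pre_f (the else branch is never reached inside Pre_f).
def mGet (s : String) : List String :=
  if s = "/" then [".", "/"]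
  else if s = "\\" then ["\\", "."]
  else [".", "."]

-- rr = (r+1)<<1, cc = (c+1)<<1 (as loop bounds; negative values iterate zero times)
def rrOf (r : Int) : Nat := (2 * (r + 1)).toNat
def ccOf (c : Int) : Nat := (2 * (c + 1)).toNat

-- the inflated grid with its boundary ring (shared lines of both Pythons)
def inflate (r c : Int) (ll : List (List String)) : List (List String) :=
  let cc := ccOf c
  let body := (List.range (2 * r).toNat).map (fun i =>
    ["."] ++ (List.range (2 * c).toNat).map (fun j =>
      (mGet ((ll.getD (i / 2) []).getD (j / 2) "")).getD ((i + j) % 2) "") ++ ["."])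
  [List.replicate cc "."] ++ body ++ [List.replicate cc "."]

-- ll[p0][p1] (indices are in range whenever Python executes this; getD default is harmless)
def cellAt (g : List (List String)) (q : Int × Int) : String :=
  (g.getD q.1.toNat []).getD q.2.toNat ""

-- ll[p0][p1] = v
def gridSet (g : List (List String)) (q : Int × Int) (v : String) : List (List String) :=
  g.set q.1.toNat ((g.getD q.1.toNat []).set q.2.toNat v)

-- vd = lambda p: p[0]>=0 and p[0]<rr and p[1]>=0 and p[1]<cc and ll[p[0]][p[1]]=='.'
def vd (rr cc : Nat) (g : List (List String)) (q : Int × Int) : Bool :=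
  decide (0 ≤ q.1) && decide (q.1 < (rr : Int)) && decide (0 ≤ q.2) &&
    decide (q.2 < (cc : Int)) && (cellAt g q == ".")

-- pp for d in dr = [(0,1),(0,-1),(-1,0),(1,0)]
def nbrs (p : Int × Int) : List (Int × Int) :=
  [(p.1, p.2 + 1), (p.1, p.2 - 1), (p.1 - 1, p.2), (p.1 + 1, p.2)]

def dotCount (g : List (List String)) : Nat := (g.map (fun row => row.count ".")).sum

-- one direction d: if vd(pp): push pp and mark it
def dirStep (rr cc k : Nat) (s : List (List String) × List (Int × Int)) (pp : Int × Int) :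
    List (List String) × List (Int × Int) :=
  if vd rr cc s.1 pp then (gridSet s.1 pp (i2cP k), pp :: s.2) else s

theorem char_ofNat_toNat (n : Nat) :
    (Char.ofNat n).toNat = if n.isValidChar then n else 0 := by
  unfold Char.ofNat
  split
  · simp [Char.ofNatAux, Char.toNat]
  · rename_i h; simp

theorem i2cP_ne_dot (k : Nat) : i2cP k ≠ "." := by
  unfold i2cP
  intro h
  have h1 : [Char.ofNat (k + 97)] = ['.'] := by
    have h0 := congrArg String.toList h
    rw [String.toList_ofList] at h0
    simpa using h0
  have h2 := congrArg Char.toNat (List.head_eq_of_cons_eq h1)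
  rw [char_ofNat_toNat] at h2
  have : ('.' : Char).toNat = 46 := by decide
  rw [this] at h2
  split at h2 <;> omega

theorem count_set_lt {row : List String} {j : Nat} (h : row.getD j "" = ".") {v : String}
    (hv : v ≠ ".") : (row.set j v).count "." < row.count "." := by
  induction row generalizing j with
  | nil => simp at h
  | cons x xs ih =>
    cases j with
    | zero =>
      simp only [List.getD_cons_zero] at h
      subst h
      simp only [List.set_cons_zero, List.count_cons, beq_iff_eq]
      simp [hv]
    | succ j =>
      simp only [List.getD_cons_succ] at h
      have := ih h
      simp only [List.set_cons_succ, List.count_cons]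
      omega

theorem cellAt_pos {g : List (List String)} {q : Int × Int} (h : cellAt g q = ".") :
    q.1.toNat < g.length ∧ q.2.toNat < (g.getD q.1.toNat []).length := by
  unfold cellAt at h
  constructor
  · by_contra hlt
    rw [List.getD_eq_default _ _ (Nat.le_of_not_lt hlt)] at h
    simp at h
  · by_contra hlt
    rw [List.getD_eq_default _ _ (Nat.le_of_not_lt hlt)] at h
    simp at h

theorem dotCount_set_lt :
    ∀ (g : List (List String)) (i : Nat) (r' : List String), i < g.length →
      r'.count "." < (g.getD i []).count "." → dotCount (g.set i r') < dotCount g := by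
  intro g
  induction g with
  | nil => intro i r' hi; simp at hi
  | cons x xs ih =>
    intro i r' hi hc
    cases i with
    | zero =>
      simp only [List.getD_cons_zero] at hc
      simp only [List.set_cons_zero, dotCount, List.map_cons, List.sum_cons]
      have : dotCount xs = (xs.map (fun row => row.count ".")).sum := rfl
      omega
    | succ i =>
      simp only [List.getD_cons_succ] at hc
      simp only [List.length_cons, Nat.succ_lt_succ_iff] at hi
      have := ih i r' hi hc
      simp only [List.set_cons_succ, dotCount, List.map_cons, List.sum_cons] at *
      omega

theorem dotCount_gridSet_lt {g : List (List String)} {q : Int × Int} {v : String}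
    (h : cellAt g q = ".") (hv : v ≠ ".") : dotCount (gridSet g q v) < dotCount g := by
  obtain ⟨h1, h2⟩ := cellAt_pos h
  unfold gridSet
  apply dotCount_set_lt _ _ _ h1
  exact count_set_lt (by simpa [cellAt] using h) hv

theorem vd_cell {rr cc : Nat} {g : List (List String)} {q : Int × Int}
    (h : vd rr cc g q = true) : cellAt g q = "." := by
  simp only [vd, Bool.and_eq_true, beq_iff_eq] at h
  exact h.2

-- used by dfsLoop's termination: the 4-direction fold does not increase 5·dots + stack
theorem dirFold_measure (rr cc k : Nat) :
    ∀ (ns : List (Int × Int)) (s : List (List String) × List (Int × Int)),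
      5 * dotCount ((ns.foldl (dirStep rr cc k) s).1) + ((ns.foldl (dirStep rr cc k) s).2).length
        ≤ 5 * dotCount s.1 + s.2.length := by
  intro ns
  induction ns with
  | nil => intro s; simp
  | cons x t ih =>
    intro s
    simp only [List.foldl_cons]
    refine le_trans (ih _) ?_
    unfold dirStep
    split
    · rename_i hvd
      have := dotCount_gridSet_lt (vd_cell hvd) (i2cP_ne_dot k)
      simp only [List.length_cons]
      omega
    · exact le_refl _

-- the while-loop: pop p, try the 4 directions (marking and pushing), continue
def dfsLoop (rr cc k : Nat) (g : List (List String)) (st : List (Int × Int)) :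
    List (List String) :=
  match st with
  | [] => g
  | p :: rest =>
    let s := (nbrs p).foldl (dirStep rr cc k) (g, rest)
    dfsLoop rr cc k s.1 s.2
termination_by 5 * dotCount g + st.length
decreasing_by
  have h := dirFold_measure rr cc k (nbrs p) (g, rest)
  simp only [List.length_cons] at *
  omega

-- body of the double loop: skip non-dots; else mark the seed, run the DFS, bump k
def stepA (rr cc : Nat) (s : List (List String) × Nat) (i j : Nat) :
    List (List String) × Nat :=
  if cellAt s.1 ((i : Int), (j : Int)) ≠ "." then s
  else (dfsLoop rr cc s.2 (gridSet s.1 ((i : Int), (j : Int)) (i2cP s.2))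
          [((i : Int), (j : Int))], s.2 + 1)

def f (r : Int) (c : Int) (ll : List (List String)) : Int :=
  let g0 := inflate r c ll
  let res := (List.range (rrOf r)).foldl (fun s i =>
    (List.range (ccOf c)).foldl (fun s j => stepA (rrOf r) (ccOf c) s i j) s) (g0, 0)
  (res.2 : Int) - 1

-- ===== PORT B =====
-- used by bfs's termination
theorem filter_length_lt {α : Type} {l : List α} {p q : α → Bool}
    (himp : ∀ a, q a = true → p a = true) {x : α} (hx : x ∈ l) (hpx : p x = true)
    (hqx : q x = false) : (l.filter q).length < (l.filter p).length := by
  have hsub : (l.filter p).filter q = l.filter q := by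
    rw [List.filter_filter]
    apply List.filter_congr
    intro a _
    by_cases hqa : q a = true
    · simp [hqa, himp a hqa]
    · simp at hqa; simp [hqa]
  have hsl : List.Sublist (l.filter q) (l.filter p) := by
    rw [← hsub]; exact List.filter_sublist
  rcases eq_or_lt_of_le hsl.length_le with heq | hlt
  · exfalso
    have heqlist := hsl.eq_of_length heq
    have hxp : x ∈ l.filter p := List.mem_filter.2 ⟨hx, hpx⟩
    rw [← heqlist] at hxp
    have := (List.mem_filter.1 hxp).2
    rw [hqx] at this
    exact Bool.false_ne_true this
  · exact hlt

-- the frontier update {(p0+d0,p1+d1) for (p0,p1) in frontier ... if in dots and not in comp}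
def nfOf (dots comp frontier : PySem.Set (Int × Int)) : PySem.Set (Int × Int) :=
  PySem.Set.ofList (frontier.flatMap (fun p =>
    (nbrs p).filter (fun q => PySem.Set.contains dots q && !PySem.Set.contains comp q)))

-- membership in the BFS frontier update
theorem mem_nfOf {dots comp frontier : PySem.Set (Int × Int)} {q : Int × Int} :
    q ∈ nfOf dots comp frontier ↔
      ((∃ p ∈ frontier, q ∈ nbrs p) ∧ q ∈ dots ∧ q ∉ comp) := by
  simp only [nfOf, PySem.Set.mem_ofList, List.mem_flatMap, List.mem_filter,
    Bool.and_eq_true, Bool.not_eq_eq_eq_not, Bool.not_true, PySem.Set.contains_eq_listContains]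
  constructor
  · rintro ⟨p, hp, hq, h1, h2⟩
    refine ⟨⟨p, hp, hq⟩, by simpa using h1, by simpa using h2⟩
  · rintro ⟨⟨p, hp, hq⟩, h1, h2⟩
    exact ⟨p, hp, hq, by simpa using h1, by simpa using h2⟩

-- while frontier: frontier = {neighbours of frontier still in dots and not in comp}; comp |= frontier
def bfs (dots comp frontier : PySem.Set (Int × Int)) : PySem.Set (Int × Int) :=
  if frontier.isEmpty then comp
  else bfs dots (PySem.Set.union comp (nfOf dots comp frontier)) (nfOf dots comp frontier)
termination_by ((dots.filter (fun q => !PySem.Set.contains comp q)).length, frontier.length)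
decreasing_by
  rename_i hfr
  rcases hnf : nfOf dots comp frontier with _ | ⟨x, t⟩
  · have hu : PySem.Set.union comp ([] : List (Int × Int)) = comp := by
      simp [PySem.Set.union, PySem.Set.update]
    simp only [hu]
    apply Prod.Lex.right
    have hne : frontier ≠ [] := by simpa [List.isEmpty_iff] using hfr
    simpa using List.length_pos_of_ne_nil hne
  · apply Prod.Lex.left
    have hx : x ∈ nfOf dots comp frontier := by rw [hnf]; exact List.mem_cons_self
    obtain ⟨-, hxd, hxc⟩ := mem_nfOf.1 hx
    apply filter_length_lt (x := x) _ hxd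
    · simpa [PySem.Set.contains_eq_listContains] using hxc
    · simp [PySem.Set.contains_eq_listContains]
    · intro a ha
      simp only [PySem.Set.contains_eq_listContains] at ha ⊢
      simp only [Bool.not_eq_true', List.contains_eq_mem, decide_eq_false_iff_not] at ha ⊢
      intro hmem
      exact ha ((PySem.Set.mem_union _ _ _).2 (Or.inl hmem))

-- dots = {(i,j) for i in range(rr) for j in range(cc) if g[i][j]=='.'}
def dots0 (rr cc : Nat) (g : List (List String)) : PySem.Set (Int × Int) :=
  PySem.Set.ofList ((List.range rr).flatMap (fun (i : Nat) =>
    (List.range cc).filterMap (fun (j : Nat) =>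
      if cellAt g ((i : Int), (j : Int)) = "." then some ((i : Int), (j : Int)) else none)))

-- body of the double loop: if (i,j) still in dots, peel its whole component off
def stepB (s : PySem.Set (Int × Int) × Nat) (i j : Nat) : PySem.Set (Int × Int) × Nat :=
  if PySem.Set.contains s.1 ((i : Int), (j : Int)) then
    (PySem.Set.diff s.1 (bfs s.1 [((i : Int), (j : Int))] [((i : Int), (j : Int))]), s.2 + 1)
  else s

def f_alt (r : Int) (c : Int) (ll : List (List String)) : Int :=
  let g := inflate r c ll
  let res := (List.range (rrOf r)).foldl (fun s i =>
    (List.range (ccOf c)).foldl (fun s j => stepB s i j) s)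
    (dots0 (rrOf r) (ccOf c) g, 0)
  (res.2 : Int) - 1

-- ===== PRECONDITION & SPEC =====
-- Pre_f excludes exactly the inputs on which the Python A raises: with r>0 and c>0 it
-- reads the first r rows and first c cells of each and looks each cell up in the dict m,
-- so a missing row/cell is an IndexError and a cell other than '.', '/', '\' a KeyError.
def Pre_f (r : Int) (c : Int) (ll : List (List String)) : Prop :=
  r ≤ 0 ∨ c ≤ 0 ∨ (r.toNat ≤ ll.length ∧ ∀ row ∈ ll.take r.toNat,
    c.toNat ≤ row.length ∧ ∀ s ∈ row.take c.toNat, s = "." ∨ s = "/" ∨ s = "\\")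
instance (r : Int) (c : Int) (ll : List (List String)) : Decidable (Pre_f r c ll) := by
  unfold Pre_f; infer_instance

def pvWitness_f : Int × Int × List (List String) := (1, 1, [["/"]])

def Spec_f (r : Int) (c : Int) (ll : List (List String)) (out : Int) : Prop := out = f_alt r c ll
instance (r : Int) (c : Int) (ll : List (List String)) (out : Int) : Decidable (Spec_f r c ll out) := by unfold Spec_f; infer_instance

-- ===== CLAIM (what is proved, stated in full; the proofs are below) =====
def Claim_equal_f : Prop := ∀ (r : Int) (c : Int) (ll : List (List String)), Dom_f r c ll → Pre_f r c ll → Spec_f r c ll (f r c ll)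

-- ===== LEMMAS AND PROOFS =====

-- the in-range dot cells of a grid, as a predicate on coordinates
def DotP (rr cc : Nat) (g : List (List String)) (q : Int × Int) : Prop :=
  0 ≤ q.1 ∧ q.1 < (rr : Int) ∧ 0 ≤ q.2 ∧ q.2 < (cc : Int) ∧ cellAt g q = "."

-- reachability from a seed set W through dot cells D by single neighbour steps
inductive Reach (D W : Int × Int → Prop) : Int × Int → Prop
  | base {p q} : W p → q ∈ nbrs p → D q → Reach D W q
  | step {p q} : Reach D W p → q ∈ nbrs p → D q → Reach D W q

theorem reach_mono {D D' W W' : Int × Int → Prop} (hD : ∀ x, D x → D' x)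
    (hW : ∀ x, W x → W' x) {q : Int × Int} (h : Reach D W q) : Reach D' W' q := by
  induction h with
  | base hp ha hd => exact .base (hW _ hp) ha (hD _ hd)
  | step _ ha hd ih => exact .step ih ha (hD _ hd)

theorem reach_from {D W W' : Int × Int → Prop} (hW : ∀ x, W' x → Reach D W x)
    {q : Int × Int} (h : Reach D W' q) : Reach D W q := by
  induction h with
  | base hp ha hd => exact .step (hW _ hp) ha hd
  | step _ ha hd ih => exact .step ih ha hd

theorem reach_empty {D : Int × Int → Prop} {q : Int × Int}
    (h : Reach D (fun x => x ∈ ([] : List (Int × Int))) q) : False := by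
  induction h with
  | base hp _ _ => simp at hp
  | step _ _ _ ih => exact ih

theorem reach_push_forward {D W : Int × Int → Prop} {pp q : Int × Int}
    (h : Reach D W q) :
    q = pp ∨ Reach (fun x => D x ∧ x ≠ pp) (fun x => W x ∨ x = pp) q := by
  induction h with
  | @base p0 q0 hp ha hd =>
    by_cases hq : q0 = pp
    · exact Or.inl hq
    · exact Or.inr (.base (Or.inl hp) ha ⟨hd, hq⟩)
  | @step p0 q0 _ ha hd ih =>
    by_cases hq : q0 = pp
    · exact Or.inl hq
    · rcases ih with h | h
      · exact Or.inr (.base (Or.inr h) ha ⟨hd, hq⟩)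
      · exact Or.inr (.step h ha ⟨hd, hq⟩)

theorem reach_push_back {D W : Int × Int → Prop} {p pp : Int × Int} (hWp : W p)
    (ha : pp ∈ nbrs p) (hd : D pp) {q : Int × Int}
    (h : Reach (fun x => D x ∧ x ≠ pp) (fun x => W x ∨ x = pp) q) : Reach D W q := by
  induction h with
  | base hp ha' hd' =>
    rcases hp with h0 | h0
    · exact .base h0 ha' hd'.1
    · subst h0; exact .step (.base hWp ha hd) ha' hd'.1
  | step _ ha' hd' ih => exact .step ih ha' hd'.1

-- the set identity for pushing one neighbour pp of an active p
theorem ans_push {D W : Int × Int → Prop} {p pp : Int × Int} (hWp : W p)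
    (ha : pp ∈ nbrs p) (hd : D pp) (q : Int × Int) :
    (D q ∧ ¬ Reach D W q) ↔
      ((D q ∧ q ≠ pp) ∧ ¬ Reach (fun x => D x ∧ x ≠ pp) (fun x => W x ∨ x = pp) q) := by
  constructor
  · rintro ⟨hDq, hn⟩
    have hne : q ≠ pp := by rintro rfl; exact hn (.base hWp ha hd)
    exact ⟨⟨hDq, hne⟩, fun h => hn (reach_push_back hWp ha hd h)⟩
  · rintro ⟨⟨hDq, hne⟩, hn⟩
    refine ⟨hDq, fun h => ?_⟩
    rcases reach_push_forward (pp := pp) h with h | h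
    · exact hne h
    · exact hn h

theorem reach_drop {D W : Int × Int → Prop} {p : Int × Int}
    (hp : ∀ q ∈ nbrs p, ¬ D q) (q : Int × Int) :
    Reach D (fun x => x = p ∨ W x) q ↔ Reach D W q := by
  constructor
  · intro h
    induction h with
    | base hp0 ha hd =>
      rcases hp0 with h0 | h0
      · subst h0; exact absurd hd (hp _ ha)
      · exact .base h0 ha hd
    | step _ ha hd ih => exact .step ih ha hd
  · exact reach_mono (fun _ h => h) (fun _ h => Or.inr h)

-- transport of the "answer set" along pointwise-equal D and W
theorem ans_congr {D D' W W' : Int × Int → Prop} (hD : ∀ x, D x ↔ D' x)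
    (hW : ∀ x, W x ↔ W' x) (q : Int × Int) :
    (D q ∧ ¬ Reach D W q) ↔ (D' q ∧ ¬ Reach D' W' q) := by
  constructor
  · rintro ⟨h1, h2⟩
    exact ⟨(hD q).1 h1, fun h => h2 (reach_mono (fun x => (hD x).2) (fun x => (hW x).2) h)⟩
  · rintro ⟨h1, h2⟩
    exact ⟨(hD q).2 h1, fun h => h2 (reach_mono (fun x => (hD x).1) (fun x => (hW x).1) h)⟩

theorem cellAt_gridSet_self {g : List (List String)} {q : Int × Int} {v : String}
    (h : cellAt g q = ".") : cellAt (gridSet g q v) q = v := by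
  obtain ⟨h1, h2⟩ := cellAt_pos h
  rw [List.getD_eq_getElem?_getD] at h2
  simp only [cellAt, gridSet, List.getD_eq_getElem?_getD, List.getElem?_set_self h1,
    Option.getD_some, List.getElem?_set_self h2]

theorem cellAt_gridSet_other {g : List (List String)} {p q : Int × Int} {v : String}
    (hne : q.1.toNat ≠ p.1.toNat ∨ q.2.toNat ≠ p.2.toNat) :
    cellAt (gridSet g p v) q = cellAt g q := by
  rcases hne with hne | hne
  · simp only [cellAt, gridSet, List.getD_eq_getElem?_getD,
      List.getElem?_set_ne (Ne.symm hne)]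
  · by_cases hrow : q.1.toNat = p.1.toNat
    · by_cases hlen : p.1.toNat < g.length
      · simp only [cellAt, gridSet, List.getD_eq_getElem?_getD, hrow,
          List.getElem?_set_self hlen, Option.getD_some, List.getElem?_set_ne (Ne.symm hne)]
      · unfold cellAt gridSet
        rw [List.set_eq_of_length_le (Nat.le_of_not_lt hlen)]
    · simp only [cellAt, gridSet, List.getD_eq_getElem?_getD,
        List.getElem?_set_ne (fun hh => hrow hh.symm)]

theorem vd_iff {rr cc : Nat} {g : List (List String)} {q : Int × Int} :
    vd rr cc g q = true ↔ DotP rr cc g q := by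
  simp [vd, DotP, and_assoc]

theorem DotP_gridSet {rr cc : Nat} {g : List (List String)} {p : Int × Int} {v : String}
    (hp : DotP rr cc g p) (hv : v ≠ ".") (q : Int × Int) :
    DotP rr cc (gridSet g p v) q ↔ DotP rr cc g q ∧ q ≠ p := by
  obtain ⟨hp1, hp2, hp3, hp4, hp5⟩ := hp
  constructor
  · rintro ⟨h1, h2, h3, h4, h5⟩
    have hne : q ≠ p := by
      rintro rfl
      rw [cellAt_gridSet_self hp5] at h5
      exact hv h5
    have htne : q.1.toNat ≠ p.1.toNat ∨ q.2.toNat ≠ p.2.toNat := by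
      by_contra hcon
      simp only [not_or, not_not] at hcon
      apply hne
      have e1 : q.1 = p.1 := by omega
      have e2 : q.2 = p.2 := by omega
      exact Prod.ext e1 e2
    rw [cellAt_gridSet_other htne] at h5
    exact ⟨⟨h1, h2, h3, h4, h5⟩, hne⟩
  · rintro ⟨⟨h1, h2, h3, h4, h5⟩, hne⟩
    have htne : q.1.toNat ≠ p.1.toNat ∨ q.2.toNat ≠ p.2.toNat := by
      by_contra hcon
      simp only [not_or, not_not] at hcon
      apply hne
      have e1 : q.1 = p.1 := by omega
      have e2 : q.2 = p.2 := by omega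
      exact Prod.ext e1 e2
    exact ⟨h1, h2, h3, h4, (cellAt_gridSet_other htne).trans h5⟩

-- the 4-direction fold: dots only shrink, the tried neighbours end up non-dot, and the
-- answer set with p still active is preserved
theorem dirFold_main (rr cc k : Nat) (p : Int × Int) :
    ∀ (ns : List (Int × Int)) (g : List (List String)) (st : List (Int × Int)),
      (∀ x ∈ ns, x ∈ nbrs p) →
      (∀ q, DotP rr cc ((ns.foldl (dirStep rr cc k) (g, st)).1) q → DotP rr cc g q) ∧
      (∀ x ∈ ns, ¬ DotP rr cc ((ns.foldl (dirStep rr cc k) (g, st)).1) x) ∧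
      (∀ q, (DotP rr cc ((ns.foldl (dirStep rr cc k) (g, st)).1) q ∧
               ¬ Reach (DotP rr cc ((ns.foldl (dirStep rr cc k) (g, st)).1))
                 (fun x => x = p ∨ x ∈ (ns.foldl (dirStep rr cc k) (g, st)).2) q) ↔
             (DotP rr cc g q ∧ ¬ Reach (DotP rr cc g) (fun x => x = p ∨ x ∈ st) q)) := by
  intro ns
  induction ns with
  | nil =>
    intro g st _
    exact ⟨fun q h => h, by simp, fun q => Iff.rfl⟩
  | cons x t ih =>
    intro g st hmem
    simp only [List.foldl_cons]
    by_cases hvd : vd rr cc g x = true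
    · have hdx : DotP rr cc g x := vd_iff.1 hvd
      have hstep : dirStep rr cc k (g, st) x = (gridSet g x (i2cP k), x :: st) := by
        simp [dirStep, hvd]
      rw [hstep]
      obtain ⟨ih1, ih2, ih3⟩ :=
        ih (gridSet g x (i2cP k)) (x :: st) (fun y hy => hmem y (List.mem_cons_of_mem _ hy))
      have hD1 : ∀ q, DotP rr cc (gridSet g x (i2cP k)) q ↔ DotP rr cc g q ∧ q ≠ x :=
        DotP_gridSet hdx (i2cP_ne_dot k)
      refine ⟨?_, ?_, ?_⟩
      · intro q hq; exact ((hD1 q).1 (ih1 q hq)).1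
      · intro y hy
        rcases List.mem_cons.1 hy with rfl | hy
        · intro hq; exact ((hD1 y).1 (ih1 y hq)).2 rfl
        · exact ih2 y hy
      · intro q
        rw [ih3 q]
        have hcongr := ans_congr (D := DotP rr cc (gridSet g x (i2cP k)))
          (D' := fun y => DotP rr cc g y ∧ y ≠ x)
          (W := fun y => y = p ∨ y ∈ x :: st)
          (W' := fun y => (y = p ∨ y ∈ st) ∨ y = x)
          hD1 (fun y => by simp only [List.mem_cons]; tauto) q
        rw [hcongr]
        exact (ans_push (Or.inl rfl) (hmem x List.mem_cons_self) hdx q).symm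
    · have hstep : dirStep rr cc k (g, st) x = (g, st) := by simp [dirStep, hvd]
      rw [hstep]
      obtain ⟨ih1, ih2, ih3⟩ := ih g st (fun y hy => hmem y (List.mem_cons_of_mem _ hy))
      refine ⟨ih1, ?_, ih3⟩
      intro y hy
      rcases List.mem_cons.1 hy with rfl | hy
      · intro hq; exact hvd (vd_iff.2 (ih1 y hq))
      · exact ih2 y hy

-- DFS flood fill removes exactly the cells reachable from the stack
theorem dfs_dots (rr cc k : Nat) :
    ∀ (g : List (List String)) (st : List (Int × Int)) (q : Int × Int),
      DotP rr cc (dfsLoop rr cc k g st) q ↔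
        (DotP rr cc g q ∧ ¬ Reach (DotP rr cc g) (fun x => x ∈ st) q) := by
  intro g st
  induction g, st using dfsLoop.induct rr cc k with
  | case1 g =>
    intro q
    rw [dfsLoop]
    exact ⟨fun h => ⟨h, fun hr => reach_empty hr⟩, fun h => h.1⟩
  | case2 g p rest s ih =>
    intro q
    have hd : dfsLoop rr cc k g (p :: rest) = dfsLoop rr cc k s.1 s.2 := by
      rw [dfsLoop]
    obtain ⟨m1, m2, m3⟩ := dirFold_main rr cc k p (nbrs p) g rest (fun y hy => hy)
    rw [hd, ih q]
    exact Iff.trans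
      (and_congr_right' (not_congr (reach_drop m2 q)).symm)
      (Iff.trans (m3 q)
        (ans_congr (fun _ => Iff.rfl) (fun y => (List.mem_cons).symm) q))

-- one BFS round absorbs reachability
theorem bfs_step_reach {dots comp frontier : PySem.Set (Int × Int)} {q : Int × Int}
    (hinv : ∀ x, x ∈ comp → x ∉ frontier → ∀ q' ∈ nbrs x, q' ∈ dots → q' ∈ comp)
    (h : Reach (fun x => x ∈ dots ∧ x ∉ comp) (fun x => x ∈ frontier) q) :
    q ∈ PySem.Set.union comp (nfOf dots comp frontier) ∨
      Reach (fun x => x ∈ dots ∧ x ∉ PySem.Set.union comp (nfOf dots comp frontier))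
        (fun x => x ∈ nfOf dots comp frontier) q := by
  induction h with
  | @base p0 q0 hp ha hd =>
    exact Or.inl ((PySem.Set.mem_union _ _ _).2 (Or.inr (mem_nfOf.2 ⟨⟨p0, hp, ha⟩, hd.1, hd.2⟩)))
  | @step p0 q0 hR ha hd ih =>
    by_cases hqnf : q0 ∈ nfOf dots comp frontier
    · exact Or.inl ((PySem.Set.mem_union _ _ _).2 (Or.inr hqnf))
    · have hqc' : q0 ∉ PySem.Set.union comp (nfOf dots comp frontier) := fun hh =>
        ((PySem.Set.mem_union _ _ _).1 hh).elim (fun hc => hd.2 hc) hqnf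
      rcases ih with hin | hr
      · rcases (PySem.Set.mem_union _ _ _).1 hin with hc | hnf
        · by_cases hpf : p0 ∈ frontier
          · exact absurd (mem_nfOf.2 ⟨⟨p0, hpf, ha⟩, hd.1, hd.2⟩) hqnf
          · exact absurd (hinv p0 hc hpf q0 ha hd.1) hd.2
        · exact Or.inr (.base hnf ha ⟨hd.1, hqc'⟩)
      · exact Or.inr (.step hr ha ⟨hd.1, hqc'⟩)

-- BFS computes comp ∪ (cells reachable from the frontier through dots \ comp)
theorem bfs_mem :
    ∀ (dots comp frontier : PySem.Set (Int × Int)),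
      (∀ x, x ∈ comp → x ∉ frontier → ∀ q ∈ nbrs x, q ∈ dots → q ∈ comp) →
      ∀ q, q ∈ bfs dots comp frontier ↔
        q ∈ comp ∨ Reach (fun x => x ∈ dots ∧ x ∉ comp) (fun x => x ∈ frontier) q := by
  intro dots comp frontier
  induction comp, frontier using bfs.induct dots with
  | case1 comp frontier hfr =>
    intro hinv q
    rw [bfs, if_pos hfr]
    have hfr' : frontier = [] := List.isEmpty_iff.1 hfr
    subst hfr'
    exact ⟨Or.inl, fun h => h.elim id (fun hr => (reach_empty hr).elim)⟩
  | case2 comp frontier hfr ih =>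
    intro hinv q
    rw [bfs, if_neg hfr]
    have hinv' : ∀ x, x ∈ PySem.Set.union comp (nfOf dots comp frontier) →
        x ∉ nfOf dots comp frontier → ∀ q' ∈ nbrs x, q' ∈ dots →
        q' ∈ PySem.Set.union comp (nfOf dots comp frontier) := by
      intro x hx hxn y hy hyd
      rcases (PySem.Set.mem_union _ _ _).1 hx with hxc | hxnf
      · by_cases hxf : x ∈ frontier
        · by_cases hyc : y ∈ comp
          · exact (PySem.Set.mem_union _ _ _).2 (Or.inl hyc)
          · exact (PySem.Set.mem_union _ _ _).2 (Or.inr (mem_nfOf.2 ⟨⟨x, hxf, hy⟩, hyd, hyc⟩))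
        · exact (PySem.Set.mem_union _ _ _).2 (Or.inl (hinv x hxc hxf y hy hyd))
      · exact absurd hxnf hxn
    rw [ih hinv' q]
    constructor
    · rintro (h | h)
      · rcases (PySem.Set.mem_union _ _ _).1 h with h | h
        · exact Or.inl h
        · obtain ⟨⟨p0, hp0, hq⟩, hqd, hqc⟩ := mem_nfOf.1 h
          exact Or.inr (.base hp0 hq ⟨hqd, hqc⟩)
      · refine Or.inr (reach_from (fun x hx => ?_)
          (reach_mono (fun x hx => ⟨hx.1, fun hc => hx.2 ((PySem.Set.mem_union _ _ _).2 (Or.inl hc))⟩)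
            (fun x hx => hx) h))
        obtain ⟨⟨p0, hp0, hq⟩, hd, hc⟩ := mem_nfOf.1 hx
        exact .base hp0 hq ⟨hd, hc⟩
    · rintro (h | h)
      · exact Or.inl ((PySem.Set.mem_union _ _ _).2 (Or.inl h))
      · exact bfs_step_reach hinv h

theorem mem_dots0 {rr cc : Nat} {g : List (List String)} {q : Int × Int} :
    q ∈ dots0 rr cc g ↔ DotP rr cc g q := by
  rw [dots0, PySem.Set.mem_ofList, List.mem_flatMap]
  constructor
  · rintro ⟨i, hi, hq⟩
    rw [List.mem_filterMap] at hq
    obtain ⟨j, hj, hq⟩ := hq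
    rw [List.mem_range] at hi hj
    by_cases hcell : cellAt g ((i : Int), (j : Int)) = "."
    · rw [if_pos hcell, Option.some_inj] at hq
      subst hq
      refine ⟨Int.natCast_nonneg i, ?_, Int.natCast_nonneg j, ?_, hcell⟩
      · show (i : Int) < (rr : Int); exact_mod_cast hi
      · show (j : Int) < (cc : Int); exact_mod_cast hj
    · rw [if_neg hcell] at hq; cases hq
  · rintro ⟨h1, h2, h3, h4, h5⟩
    refine ⟨q.1.toNat, List.mem_range.2 (by omega), ?_⟩
    rw [List.mem_filterMap]
    refine ⟨q.2.toNat, List.mem_range.2 (by omega), ?_⟩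
    have e : (((q.1.toNat : Nat) : Int), ((q.2.toNat : Nat) : Int)) = q :=
      Prod.ext (Int.toNat_of_nonneg h1) (Int.toNat_of_nonneg h3)
    rw [e, if_pos h5]

-- relating the two folds pointwise
theorem foldl_rel {α β γ : Type} (R : α → β → Prop) (fa : α → γ → α) (fb : β → γ → β) :
    ∀ (l : List γ) (a : α) (b : β),
      (∀ x ∈ l, ∀ a b, R a b → R (fa a x) (fb b x)) → R a b →
      R (l.foldl fa a) (l.foldl fb b) := by
  intro l
  induction l with
  | nil => intro a b _ h; exact h
  | cons x t ih =>
    intro a b hstep h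
    exact ih _ _ (fun y hy => hstep y (List.mem_cons_of_mem _ hy))
      (hstep x (List.mem_cons_self) _ _ h)

def StRel (rr cc : Nat) (sa : List (List String) × Nat) (sb : PySem.Set (Int × Int) × Nat) : Prop :=
  sa.2 = sb.2 ∧ ∀ q, DotP rr cc sa.1 q ↔ q ∈ sb.1

theorem step_rel {rr cc : Nat} {i j : Nat} (hi : i < rr) (hj : j < cc)
    {sa : List (List String) × Nat} {sb : PySem.Set (Int × Int) × Nat}
    (h : StRel rr cc sa sb) : StRel rr cc (stepA rr cc sa i j) (stepB sb i j) := by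
  have hdotiff : DotP rr cc sa.1 ((i : Int), (j : Int)) ↔ cellAt sa.1 ((i : Int), (j : Int)) = "." := by
    constructor
    · exact fun hD => hD.2.2.2.2
    · intro h5
      refine ⟨Int.natCast_nonneg i, ?_, Int.natCast_nonneg j, ?_, h5⟩
      · show (i : Int) < (rr : Int); exact_mod_cast hi
      · show (j : Int) < (cc : Int); exact_mod_cast hj
  by_cases hc : ((i : Int), (j : Int)) ∈ sb.1
  · have hdot : DotP rr cc sa.1 ((i : Int), (j : Int)) := (h.2 _).2 hc
    have hcell : cellAt sa.1 ((i : Int), (j : Int)) = "." := hdotiff.1 hdot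
    have hcont : PySem.Set.contains sb.1 ((i : Int), (j : Int)) = true := by
      rw [PySem.Set.contains_eq_listContains]
      simpa using hc
    rw [stepA, if_neg (by simp [hcell]), stepB, if_pos hcont]
    have hinv0 : ∀ x, x ∈ ([((i : Int), (j : Int))] : List (Int × Int)) →
        x ∉ ([((i : Int), (j : Int))] : List (Int × Int)) →
        ∀ q' ∈ nbrs x, q' ∈ sb.1 → q' ∈ ([((i : Int), (j : Int))] : List (Int × Int)) :=
      fun x hx hnx => absurd hx hnx
    have hD1 : ∀ q, DotP rr cc (gridSet sa.1 ((i : Int), (j : Int)) (i2cP sa.2)) q ↔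
        DotP rr cc sa.1 q ∧ q ≠ ((i : Int), (j : Int)) :=
      DotP_gridSet hdot (i2cP_ne_dot _)
    refine ⟨by simp [h.1], fun q => ?_⟩
    rw [dfs_dots]
    rw [PySem.Set.mem_diff]
    rw [bfs_mem sb.1 _ _ hinv0 q]
    have hDiff : ∀ x, DotP rr cc (gridSet sa.1 ((i : Int), (j : Int)) (i2cP sa.2)) x ↔
        (x ∈ sb.1 ∧ x ∉ ([((i : Int), (j : Int))] : List (Int × Int))) := by
      intro x
      rw [hD1 x, h.2 x]
      simp
    rw [ans_congr hDiff (fun _ => Iff.rfl) q]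
    simp only [List.mem_singleton]
    constructor
    · rintro ⟨⟨hq1, hq2⟩, hq3⟩
      exact ⟨hq1, fun hh => hh.elim hq2 hq3⟩
    · rintro ⟨hq1, hq2⟩
      exact ⟨⟨hq1, fun hh => hq2 (Or.inl hh)⟩, fun hh => hq2 (Or.inr hh)⟩
  · have hnd : ¬ DotP rr cc sa.1 ((i : Int), (j : Int)) := fun hD => hc ((h.2 _).1 hD)
    have hcell : cellAt sa.1 ((i : Int), (j : Int)) ≠ "." := fun h5 => hnd (hdotiff.2 h5)
    have hcont : PySem.Set.contains sb.1 ((i : Int), (j : Int)) = false := by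
      rw [PySem.Set.contains_eq_listContains]
      simpa using hc
    rw [stepA, if_pos (by simp [hcell]), stepB,
      if_neg (by rw [hcont]; exact Bool.false_ne_true)]
    exact h

theorem main_eq (r c : Int) (ll : List (List String)) : f r c ll = f_alt r c ll := by
  have hrel : StRel (rrOf r) (ccOf c)
      ((List.range (rrOf r)).foldl (fun s i =>
        (List.range (ccOf c)).foldl (fun s j => stepA (rrOf r) (ccOf c) s i j) s)
        (inflate r c ll, 0))
      ((List.range (rrOf r)).foldl (fun s i =>
        (List.range (ccOf c)).foldl (fun s j => stepB s i j) s)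
        (dots0 (rrOf r) (ccOf c) (inflate r c ll), 0)) := by
    apply foldl_rel (StRel (rrOf r) (ccOf c))
    · intro x hx a b hab
      apply foldl_rel (StRel (rrOf r) (ccOf c))
      · intro y hy a' b' hab'
        exact step_rel (List.mem_range.1 hx) (List.mem_range.1 hy) hab'
      · exact hab
    · exact ⟨rfl, fun q => mem_dots0.symm⟩
  simp only [f, f_alt]
  rw [hrel.1]

-- ===== VERDICT (by name: the statement is the Claim_ definition above) =====
theorem f_spec : Claim_equal_f := by
  intro r c ll _ _
  exact main_eq r c ll
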